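-- pv_equiv track=rewrite | github.com/Hoanganhvu123/LeadGPT_V1 | leadgpt/agent/excutor.py | _format_log_to_string
-- ===== SOURCE A (Python) =====
-- from typing import Any, Dict, Optional, List
--
-- def _format_log_to_string(intermediate_steps: List[Dict[str, Any]]) -> str:
--     log_string = "> Entering new CustomAgentExecutor chain...\n"
--     for step in intermediate_steps:
--         if "thought" in step:
--             log_string += f"Thought: {step['thought']}\n"
--         if "action" in step:
--             log_string += f"Action: {step['action']}\n"
--         if "action_input" in step:
--             log_string += f"Action Input: {step['action_input']}\n"
--         if "observation" in step:
--             log_string += f"Observation: {step['observation']}\n"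
--         if "output" in step:
--             log_string += f"{step['output']}\n"
--         # Add this else block to handle any other type of step
--         for key, value in step.items():
--             if key not in ["thought", "action", "action_input", "observation", "output"]:
--                 log_string += f"{key}: {value}\n"
--     log_string += "> Finished chain.\n"
--     return log_string
-- ===== SOURCE B (Python) =====
-- _ORDER = {"thought": 0, "action": 1, "action_input": 2,
--           "observation": 3, "output": 4}
-- _PREFIXES = {"thought": "Thought: ", "action": "Action: ",
--              "action_input": "Action Input: ", "observation": "Observation: ",
--              "output": ""}
--
-- def _format_log_to_string(intermediate_steps):
--     # One stable sort by a rank table puts each step's items in the exact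
--     # order A emits them: known keys by fixed rank, unknown keys after,
--     # in original (insertion) order thanks to sort stability.
--     lines = ["> Entering new CustomAgentExecutor chain...\n"]
--     for step in intermediate_steps:
--         for key, value in sorted(step.items(), key=lambda kv: _ORDER.get(kv[0], 5)):
--             lines.append(_PREFIXES.get(key, f"{key}: ") + f"{value}\n")
--     lines.append("> Finished chain.\n")
--     return "".join(lines)
-- ===== Notes on version B (the rewrite author's own statement) =====
-- stated objective: alternative
-- what changed: Instead of A's fixed chain of five key-membership branches followed by a second scan over the remaining items, B performs ONE stable sort of each step's items under a rank table (known keys rank 0-4, everything else 5) and renders every item uniformly with a prefix table; Pre_ excludes association lists that repeat a key within a step, which a Python dict argument cannot represent.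
import Mathlib
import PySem

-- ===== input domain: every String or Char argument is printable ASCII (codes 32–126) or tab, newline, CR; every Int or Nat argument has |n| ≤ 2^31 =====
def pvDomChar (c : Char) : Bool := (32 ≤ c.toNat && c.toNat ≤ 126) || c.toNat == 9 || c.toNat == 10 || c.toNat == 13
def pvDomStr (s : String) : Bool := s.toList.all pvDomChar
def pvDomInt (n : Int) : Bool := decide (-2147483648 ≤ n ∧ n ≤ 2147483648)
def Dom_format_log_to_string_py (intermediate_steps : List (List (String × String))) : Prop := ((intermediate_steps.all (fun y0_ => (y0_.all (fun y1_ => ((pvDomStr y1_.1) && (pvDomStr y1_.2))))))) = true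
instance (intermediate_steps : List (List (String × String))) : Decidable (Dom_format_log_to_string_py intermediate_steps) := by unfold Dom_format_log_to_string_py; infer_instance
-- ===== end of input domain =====

-- B replaces A's fixed branch chain plus second items-scan by ONE stable sort of each
-- step's items under a rank table, then a single uniform line-rendering pass (objective:
-- alternative — a different ordering algorithm of similar cost).

-- ===== PORT A =====
-- dict membership / first-match lookup ('k in step' / step[k])
def pvLookup (step : List (String × String)) (k : String) : Option String :=
  (step.find? (fun kv => kv.1 == k)).map (·.2)

def format_log_to_string_py (intermediate_steps : List (List (String × String))) : String :=
  let log0 := "> Entering new CustomAgentExecutor chain...\n"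
  let log := intermediate_steps.foldl (fun log_string step =>
    let log_string := match pvLookup step "thought" with
      | some v => log_string ++ "Thought: " ++ v ++ "\n"
      | none => log_string
    let log_string := match pvLookup step "action" with
      | some v => log_string ++ "Action: " ++ v ++ "\n"
      | none => log_string
    let log_string := match pvLookup step "action_input" with
      | some v => log_string ++ "Action Input: " ++ v ++ "\n"
      | none => log_string
    let log_string := match pvLookup step "observation" with
      | some v => log_string ++ "Observation: " ++ v ++ "\n"
      | none => log_string
    let log_string := match pvLookup step "output" with
      | some v => log_string ++ v ++ "\n"
      | none => log_string
    step.foldl (fun ls kv =>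
      if ["thought", "action", "action_input", "observation", "output"].contains kv.1
      then ls
      else ls ++ kv.1 ++ ": " ++ kv.2 ++ "\n") log_string) log0
  log ++ "> Finished chain.\n"

-- ===== PORT B =====
-- _ORDER: rank table for the stable sort
def pvOrderDict : PySem.Dict String Int :=
  PySem.Dict.ofList [("thought", 0), ("action", 1), ("action_input", 2), ("observation", 3), ("output", 4)]
-- _PREFIXES: label table for rendering one line
def pvPrefixDict : PySem.Dict String String :=
  PySem.Dict.ofList [("thought", "Thought: "), ("action", "Action: "), ("action_input", "Action Input: "),
                     ("observation", "Observation: "), ("output", "")]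

-- key=lambda kv: _ORDER.get(kv[0], 5)
def pvRank (kv : String × String) : Int := pvOrderDict.getD kv.1 5
-- _PREFIXES.get(key, f"{key}: ") + f"{value}\n"
def pvLine (kv : String × String) : String := pvPrefixDict.getD kv.1 (kv.1 ++ ": ") ++ kv.2 ++ "\n"

def format_log_to_string_py_alt (intermediate_steps : List (List (String × String))) : String :=
  let lines := ["> Entering new CustomAgentExecutor chain...\n"]
  let lines := intermediate_steps.foldl (fun lines step =>
    lines ++ (PySem.List.sorted step pvRank false).map pvLine) lines
  let lines := lines ++ ["> Finished chain.\n"]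
  String.join lines

-- ===== PRECONDITION & SPEC =====
-- Pre_ excludes steps whose association list repeats a key: a Python dict (A's and B's
-- actual argument type) cannot represent duplicate keys, so which occurrence wins there
-- is an artefact of the List encoding, not of either program.
def Pre_format_log_to_string_py (intermediate_steps : List (List (String × String))) : Prop :=
  ∀ step ∈ intermediate_steps, (step.map Prod.fst).Nodup
instance (intermediate_steps : List (List (String × String))) : Decidable (Pre_format_log_to_string_py intermediate_steps) := by unfold Pre_format_log_to_string_py; infer_instance

def pvWitness_format_log_to_string_py : (List (List (String × String))) :=
  [[("thought", "think"), ("action", "search"), ("foo", "bar")], [("output", "done")]]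

def Spec_format_log_to_string_py (intermediate_steps : List (List (String × String))) (out : String) : Prop := out = format_log_to_string_py_alt intermediate_steps
instance (intermediate_steps : List (List (String × String))) (out : String) : Decidable (Spec_format_log_to_string_py intermediate_steps out) := by unfold Spec_format_log_to_string_py; infer_instance

-- ===== CLAIM (what is proved, stated in full; the proofs are below) =====
def Claim_equal_format_log_to_string_py : Prop := ∀ (intermediate_steps : List (List (String × String))), Dom_format_log_to_string_py intermediate_steps → Pre_format_log_to_string_py intermediate_steps → Spec_format_log_to_string_py intermediate_steps (format_log_to_string_py intermediate_steps)

-- ===== LEMMAS AND PROOFS =====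

-- ---- string-join bookkeeping ----
theorem foldl_str (l : List String) (a b : String) :
    l.foldl (fun r s => r ++ s) (a ++ b) = a ++ l.foldl (fun r s => r ++ s) b := by
  induction l generalizing b with
  | nil => rfl
  | cons c t ih => simp only [List.foldl_cons, String.append_assoc, ih]

theorem join_cons (a : String) (l : List String) :
    String.join (a :: l) = a ++ String.join l := by
  have h : a = a ++ "" := by simp
  simp only [String.join, List.foldl_cons]
  rw [String.empty_append, h, foldl_str]
  simp

theorem join_append (l1 l2 : List String) :
    String.join (l1 ++ l2) = String.join l1 ++ String.join l2 := by
  induction l1 with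
  | nil => simp [String.join]
  | cons a t ih => simp [join_cons, ih, String.append_assoc]

-- ---- the rank function, characterised as a key test chain ----
theorem rankKey_eq (k : String) :
    pvOrderDict.getD k 5 = if k = "thought" then 0 else if k = "action" then 1
      else if k = "action_input" then 2 else if k = "observation" then 3
      else if k = "output" then 4 else 5 := by
  by_cases h1 : k = "thought"; · subst h1; decide
  by_cases h2 : k = "action"; · subst h2; decide
  by_cases h3 : k = "action_input"; · subst h3; decide
  by_cases h4 : k = "observation"; · subst h4; decide
  by_cases h5 : k = "output"; · subst h5; decide
  have e1 : ("thought" == k) = false := beq_eq_false_iff_ne.mpr (fun h => h1 h.symm)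
  have e2 : ("action" == k) = false := beq_eq_false_iff_ne.mpr (fun h => h2 h.symm)
  have e3 : ("action_input" == k) = false := beq_eq_false_iff_ne.mpr (fun h => h3 h.symm)
  have e4 : ("observation" == k) = false := beq_eq_false_iff_ne.mpr (fun h => h4 h.symm)
  have e5 : ("output" == k) = false := beq_eq_false_iff_ne.mpr (fun h => h5 h.symm)
  simp only [PySem.Dict.getD, PySem.Dict.get?]
  rw [show pvOrderDict.items = [("thought", (0:Int)), ("action", 1), ("action_input", 2), ("observation", 3), ("output", 4)] from by decide]
  simp [e1, e2, e3, e4, e5, List.find?, h1, h2, h3, h4, h5]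

theorem rank_eq (kv : String × String) :
    pvRank kv = if kv.1 = "thought" then 0 else if kv.1 = "action" then 1
      else if kv.1 = "action_input" then 2 else if kv.1 = "observation" then 3
      else if kv.1 = "output" then 4 else 5 := rankKey_eq kv.1

-- pvLine on each known key
theorem line_thought (v : String) : pvLine ("thought", v) = "Thought: " ++ v ++ "\n" := by
  simp only [pvLine]
  rw [show pvPrefixDict.getD "thought" ("thought" ++ ": ") = "Thought: " from by decide]
theorem line_action (v : String) : pvLine ("action", v) = "Action: " ++ v ++ "\n" := by
  simp only [pvLine]
  rw [show pvPrefixDict.getD "action" ("action" ++ ": ") = "Action: " from by decide]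
theorem line_action_input (v : String) : pvLine ("action_input", v) = "Action Input: " ++ v ++ "\n" := by
  simp only [pvLine]
  rw [show pvPrefixDict.getD "action_input" ("action_input" ++ ": ") = "Action Input: " from by decide]
theorem line_observation (v : String) : pvLine ("observation", v) = "Observation: " ++ v ++ "\n" := by
  simp only [pvLine]
  rw [show pvPrefixDict.getD "observation" ("observation" ++ ": ") = "Observation: " from by decide]
theorem line_output (v : String) : pvLine ("output", v) = "" ++ v ++ "\n" := by
  simp only [pvLine]
  rw [show pvPrefixDict.getD "output" ("output" ++ ": ") = "" from by decide]

-- pvLine on an unknown key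
theorem line_unknown (kv : String × String)
    (h : (["thought", "action", "action_input", "observation", "output"].contains kv.1) = false) :
    pvLine kv = kv.1 ++ ": " ++ kv.2 ++ "\n" := by
  obtain ⟨k, v⟩ := kv
  simp only [List.contains_cons, List.contains_nil, Bool.or_eq_false_iff, beq_eq_false_iff_ne] at h
  obtain ⟨h1, h2, h3, h4, h5, -⟩ := h
  have e1 : ("thought" == k) = false := beq_eq_false_iff_ne.mpr (fun h => h1 h.symm)
  have e2 : ("action" == k) = false := beq_eq_false_iff_ne.mpr (fun h => h2 h.symm)
  have e3 : ("action_input" == k) = false := beq_eq_false_iff_ne.mpr (fun h => h3 h.symm)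
  have e4 : ("observation" == k) = false := beq_eq_false_iff_ne.mpr (fun h => h4 h.symm)
  have e5 : ("output" == k) = false := beq_eq_false_iff_ne.mpr (fun h => h5 h.symm)
  simp only [pvLine, PySem.Dict.getD, PySem.Dict.get?]
  rw [show pvPrefixDict.items = [("thought", "Thought: "), ("action", "Action: "), ("action_input", "Action Input: "), ("observation", "Observation: "), ("output", "")] from by decide]
  simp [e1, e2, e3, e4, e5, List.find?, String.append_assoc]

-- rank only takes the six values 0..5
theorem rank_mem (kv : String × String) : pvRank kv ∈ ([0, 1, 2, 3, 4, 5] : List Int) := by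
  rw [rank_eq]; split_ifs <;> simp

-- ---- stable insertion sort decomposes into rank groups ----
theorem insertBy_all_false {α : Type} (before : α → α → Bool) (x : α) (g t : List α)
    (h : ∀ y ∈ g, before x y = false) :
    PySem.List.insertBy before x (g ++ t) = g ++ PySem.List.insertBy before x t := by
  induction g with
  | nil => rfl
  | cons y g ih =>
    simp only [List.cons_append, PySem.List.insertBy, h y (by simp), Bool.false_eq_true, if_false]
    rw [ih (fun y hy => h y (by simp [hy]))]

theorem insertBy_all_true {α : Type} (before : α → α → Bool) (x : α) (t : List α)
    (h : ∀ y ∈ t, before x y = true) :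
    PySem.List.insertBy before x t = x :: t := by
  cases t with
  | nil => rfl
  | cons y t => simp only [PySem.List.insertBy, h y (by simp), if_true]

theorem insert_flatMap {α : Type} (r : α → Int) (ints : List Int) (hp : ints.Pairwise (· < ·))
    (x : α) (hx : r x ∈ ints) (p : List α) :
    PySem.List.insertBy (fun a b => decide (r a < r b)) x
        (ints.flatMap (fun i => p.filter (fun a => r a == i)))
      = ints.flatMap (fun i => (p ++ [x]).filter (fun a => r a == i)) := by
  induction ints with
  | nil => simp at hx
  | cons i rest ih =>
    rw [List.pairwise_cons] at hp
    obtain ⟨hlt, hrest⟩ := hp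
    simp only [List.flatMap_cons]
    by_cases hcase : r x = i
    · have hfalse : ∀ y ∈ p.filter (fun a => r a == i), (decide (r x < r y)) = false := by
        intro y hy
        have hr : r y = i := beq_iff_eq.mp (List.mem_filter.mp hy).2
        simp [hr, hcase]
      have htrue : ∀ y ∈ rest.flatMap (fun j => p.filter (fun a => r a == j)), (decide (r x < r y)) = true := by
        intro y hy
        obtain ⟨j, hj, hyf⟩ := List.mem_flatMap.mp hy
        have hr : r y = j := beq_iff_eq.mp (List.mem_filter.mp hyf).2
        simp [hr, hcase, hlt j hj]
      rw [insertBy_all_false _ _ _ _ hfalse, insertBy_all_true _ _ _ htrue]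
      have hx1 : List.filter (fun a => r a == i) (p ++ [x])
          = List.filter (fun a => r a == i) p ++ [x] := by
        rw [List.filter_append]
        simp [hcase]
      have hrest2 : rest.flatMap (fun j => (p ++ [x]).filter (fun a => r a == j))
          = rest.flatMap (fun j => p.filter (fun a => r a == j)) := by
        apply List.flatMap_congr
        intro j hj
        rw [List.filter_append]
        have hne : r x ≠ j := by have := hlt j hj; omega
        simp [hne]
      rw [hx1, hrest2]
      simp
    · have hxr : r x ∈ rest := by
        cases List.mem_cons.mp hx with
        | inl h => exact absurd h hcase
        | inr h => exact h
      have hix : i < r x := hlt _ hxr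
      have hfalse : ∀ y ∈ p.filter (fun a => r a == i), (decide (r x < r y)) = false := by
        intro y hy
        have hr : r y = i := beq_iff_eq.mp (List.mem_filter.mp hy).2
        simp [hr]; omega
      rw [insertBy_all_false _ _ _ _ hfalse, ih hrest hxr]
      have hi : List.filter (fun a => r a == i) (p ++ [x]) = List.filter (fun a => r a == i) p := by
        rw [List.filter_append]
        simp [hcase]
      rw [hi]

theorem foldl_insert_groups {α : Type} (r : α → Int) (ints : List Int) (hp : ints.Pairwise (· < ·))
    (l : List α) (hl : ∀ a ∈ l, r a ∈ ints) (p : List α) :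
    l.foldl (fun acc x => PySem.List.insertBy (fun a b => decide (r a < r b)) x acc)
        (ints.flatMap (fun i => p.filter (fun a => r a == i)))
      = ints.flatMap (fun i => (p ++ l).filter (fun a => r a == i)) := by
  induction l generalizing p with
  | nil => simp
  | cons x t ih =>
    rw [List.foldl_cons, insert_flatMap r ints hp x (hl x (by simp)) p]
    rw [ih (fun a ha => hl a (by simp [ha])) (p ++ [x])]
    simp

theorem sorted_rank_groups (l : List (String × String)) :
    PySem.List.sorted l pvRank false
      = ([0, 1, 2, 3, 4, 5] : List Int).flatMap (fun i => l.filter (fun a => pvRank a == i)) := by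
  rw [PySem.List.sorted_eq_foldl_insertBy]
  have h := foldl_insert_groups pvRank [0, 1, 2, 3, 4, 5] (by decide) l (fun a _ => rank_mem a) []
  simpa using h

-- ---- the canonical per-step line list (proof-side) ----
def pvT (step : List (String × String)) (k pfx : String) : List String :=
  ((pvLookup step k).map (fun v => pfx ++ v ++ "\n")).toList

def pvCanon (step : List (String × String)) : List String :=
  pvT step "thought" "Thought: " ++ pvT step "action" "Action: " ++ pvT step "action_input" "Action Input: "
    ++ pvT step "observation" "Observation: " ++ pvT step "output" ""
    ++ (step.filter (fun kv => !(["thought", "action", "action_input", "observation", "output"].contains kv.1))).map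
         (fun kv => kv.1 ++ ": " ++ kv.2 ++ "\n")

-- filter by rank value i = filter by the i-th known key
theorem filter_rank_known (l : List (String × String)) (i : Int) (k : String)
    (hk : ∀ kv : String × String, (pvRank kv == i) = (kv.1 == k)) :
    l.filter (fun a => pvRank a == i) = l.filter (fun kv => kv.1 == k) :=
  List.filter_congr (fun kv _ => hk kv)

-- with distinct keys, filtering on one key yields the find? singleton, rendered by pvLine
theorem map_line_filter_key (step : List (String × String)) (hn : (step.map Prod.fst).Nodup)
    (k pfx : String) (hline : ∀ v, pvLine (k, v) = pfx ++ v ++ "\n") :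
    (step.filter (fun kv => kv.1 == k)).map pvLine = pvT step k pfx := by
  induction step with
  | nil => rfl
  | cons kv t ih =>
    simp only [List.map_cons, List.nodup_cons] at hn
    obtain ⟨hk, ht⟩ := hn
    by_cases h : kv.1 = k
    · have hb : (kv.1 == k) = true := by simp [h]
      have hnil : t.filter (fun kv => kv.1 == k) = [] := by
        rw [List.filter_eq_nil_iff]
        intro y hy hyk
        exact hk (List.mem_map.mpr ⟨y, hy, by
          have := beq_iff_eq.mp hyk
          rw [this, h]⟩)
      simp only [pvT, pvLookup, List.filter_cons, hb, if_true, hnil, List.find?_cons, hb]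
      have : kv = (k, kv.2) := by rw [← h]
      rw [this, List.map_cons, List.map_nil, hline]
      rfl
    · have hb : (kv.1 == k) = false := by simp [h]
      simp only [pvT, pvLookup, List.filter_cons, hb, Bool.false_eq_true, if_false,
        List.find?_cons, hb]
      exact ih ht

-- rank 5 = unknown key
theorem rank5_iff (kv : String × String) :
    (pvRank kv == 5) = !(["thought", "action", "action_input", "observation", "output"].contains kv.1) := by
  rw [rank_eq]
  by_cases h1 : kv.1 = "thought"; · simp [h1]
  by_cases h2 : kv.1 = "action"; · simp [h1, h2]
  by_cases h3 : kv.1 = "action_input"; · simp [h1, h2, h3]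
  by_cases h4 : kv.1 = "observation"; · simp [h1, h2, h3, h4]
  by_cases h5 : kv.1 = "output"; · simp [h1, h2, h3, h4, h5]
  simp [h1, h2, h3, h4, h5]

-- each known rank tests exactly its key
theorem rank0_iff (kv : String × String) : (pvRank kv == 0) = (kv.1 == "thought") := by
  rw [rank_eq]; by_cases h : kv.1 = "thought" <;> [simp [h]; skip]
  by_cases h2 : kv.1 = "action"; · simp [h, h2]
  by_cases h3 : kv.1 = "action_input"; · simp [h, h2, h3]
  by_cases h4 : kv.1 = "observation"; · simp [h, h2, h3, h4]
  by_cases h5 : kv.1 = "output"; · simp [h, h2, h3, h4, h5]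
  simp [h, h2, h3, h4, h5]
theorem rank1_iff (kv : String × String) : (pvRank kv == 1) = (kv.1 == "action") := by
  rw [rank_eq]; by_cases h1 : kv.1 = "thought"; · simp [h1]
  by_cases h2 : kv.1 = "action"; · simp [h1, h2]
  by_cases h3 : kv.1 = "action_input"; · simp [h1, h2, h3]
  by_cases h4 : kv.1 = "observation"; · simp [h1, h2, h3, h4]
  by_cases h5 : kv.1 = "output"; · simp [h1, h2, h3, h4, h5]
  simp [h1, h2, h3, h4, h5]
theorem rank2_iff (kv : String × String) : (pvRank kv == 2) = (kv.1 == "action_input") := by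
  rw [rank_eq]; by_cases h1 : kv.1 = "thought"; · simp [h1]
  by_cases h2 : kv.1 = "action"; · simp [h1, h2]
  by_cases h3 : kv.1 = "action_input"; · simp [h1, h2, h3]
  by_cases h4 : kv.1 = "observation"; · simp [h1, h2, h3, h4]
  by_cases h5 : kv.1 = "output"; · simp [h1, h2, h3, h4, h5]
  simp [h1, h2, h3, h4, h5]
theorem rank3_iff (kv : String × String) : (pvRank kv == 3) = (kv.1 == "observation") := by
  rw [rank_eq]; by_cases h1 : kv.1 = "thought"; · simp [h1]
  by_cases h2 : kv.1 = "action"; · simp [h1, h2]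
  by_cases h3 : kv.1 = "action_input"; · simp [h1, h2, h3]
  by_cases h4 : kv.1 = "observation"; · simp [h1, h2, h3, h4]
  by_cases h5 : kv.1 = "output"; · simp [h1, h2, h3, h4, h5]
  simp [h1, h2, h3, h4, h5]
theorem rank4_iff (kv : String × String) : (pvRank kv == 4) = (kv.1 == "output") := by
  rw [rank_eq]; by_cases h1 : kv.1 = "thought"; · simp [h1]
  by_cases h2 : kv.1 = "action"; · simp [h1, h2]
  by_cases h3 : kv.1 = "action_input"; · simp [h1, h2, h3]
  by_cases h4 : kv.1 = "observation"; · simp [h1, h2, h3, h4]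
  by_cases h5 : kv.1 = "output"; · simp [h1, h2, h3, h4, h5]
  simp [h1, h2, h3, h4, h5]

-- B's per-step sorted line list IS the canonical list, given distinct keys
theorem stepmap_eq_canon (step : List (String × String)) (hn : (step.map Prod.fst).Nodup) :
    (PySem.List.sorted step pvRank false).map pvLine = pvCanon step := by
  rw [sorted_rank_groups]
  simp only [List.flatMap_cons, List.flatMap_nil, List.append_nil, List.map_append]
  rw [filter_rank_known step 0 "thought" rank0_iff, map_line_filter_key step hn _ _ line_thought,
      filter_rank_known step 1 "action" rank1_iff, map_line_filter_key step hn _ _ line_action,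
      filter_rank_known step 2 "action_input" rank2_iff, map_line_filter_key step hn _ _ line_action_input,
      filter_rank_known step 3 "observation" rank3_iff, map_line_filter_key step hn _ _ line_observation,
      filter_rank_known step 4 "output" rank4_iff, map_line_filter_key step hn _ _ line_output]
  have h5 : step.filter (fun a => pvRank a == 5)
      = step.filter (fun kv => !(["thought", "action", "action_input", "observation", "output"].contains kv.1)) :=
    List.filter_congr (fun kv _ => rank5_iff kv)
  rw [h5]
  have hmap : (step.filter (fun kv => !(["thought", "action", "action_input", "observation", "output"].contains kv.1))).map pvLine
      = (step.filter (fun kv => !(["thought", "action", "action_input", "observation", "output"].contains kv.1))).map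
          (fun kv => kv.1 ++ ": " ++ kv.2 ++ "\n") := by
    apply List.map_congr_left
    intro kv hkv
    have := List.of_mem_filter hkv
    exact line_unknown kv (by simpa using this)
  rw [hmap]
  simp [pvCanon, List.append_assoc]

-- ---- A's per-step body appends exactly join (pvCanon step) ----
theorem extra_fold (step : List (String × String)) (acc : String) :
    step.foldl (fun ls kv =>
      if ["thought", "action", "action_input", "observation", "output"].contains kv.1
      then ls
      else ls ++ kv.1 ++ ": " ++ kv.2 ++ "\n") acc
    = acc ++ String.join ((step.filter (fun kv => !(["thought", "action", "action_input", "observation", "output"].contains kv.1))).map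
        (fun kv => kv.1 ++ ": " ++ kv.2 ++ "\n")) := by
  induction step generalizing acc with
  | nil => simp [String.join]
  | cons kv t ih =>
    rw [List.foldl_cons, List.filter_cons]
    cases h : (["thought", "action", "action_input", "observation", "output"].contains kv.1)
    · simp only [h, Bool.not_false, if_true, Bool.false_eq_true, if_false, List.map_cons,
        join_cons, ih]
      simp [String.append_assoc]
    · simp only [h, Bool.not_true, if_true, Bool.false_eq_true, if_false]
      exact ih acc

theorem step_eq (step : List (String × String)) (acc : String) :
    (let acc := match pvLookup step "thought" with
      | some v => acc ++ "Thought: " ++ v ++ "\n"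
      | none => acc
    let acc := match pvLookup step "action" with
      | some v => acc ++ "Action: " ++ v ++ "\n"
      | none => acc
    let acc := match pvLookup step "action_input" with
      | some v => acc ++ "Action Input: " ++ v ++ "\n"
      | none => acc
    let acc := match pvLookup step "observation" with
      | some v => acc ++ "Observation: " ++ v ++ "\n"
      | none => acc
    let acc := match pvLookup step "output" with
      | some v => acc ++ v ++ "\n"
      | none => acc
    step.foldl (fun ls kv =>
      if ["thought", "action", "action_input", "observation", "output"].contains kv.1
      then ls
      else ls ++ kv.1 ++ ": " ++ kv.2 ++ "\n") acc)
    = acc ++ String.join (pvCanon step) := by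
  cases h1 : pvLookup step "thought" <;> cases h2 : pvLookup step "action" <;>
    cases h3 : pvLookup step "action_input" <;> cases h4 : pvLookup step "observation" <;>
    cases h5 : pvLookup step "output" <;>
      (simp only [pvCanon, pvT, h1, h2, h3, h4, h5, Option.map_some, Option.map_none,
        Option.toList_some, Option.toList_none, extra_fold, join_cons, join_append,
        List.nil_append, List.cons_append, String.empty_append]
       try simp only [String.join, List.foldl_nil]
       try simp only [String.append_assoc, String.empty_append, String.append_empty])

theorem main_fold (steps : List (List (String × String))) (acc : String) :
    steps.foldl (fun log_string step =>
      let log_string := match pvLookup step "thought" with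
        | some v => log_string ++ "Thought: " ++ v ++ "\n"
        | none => log_string
      let log_string := match pvLookup step "action" with
        | some v => log_string ++ "Action: " ++ v ++ "\n"
        | none => log_string
      let log_string := match pvLookup step "action_input" with
        | some v => log_string ++ "Action Input: " ++ v ++ "\n"
        | none => log_string
      let log_string := match pvLookup step "observation" with
        | some v => log_string ++ "Observation: " ++ v ++ "\n"
        | none => log_string
      let log_string := match pvLookup step "output" with
        | some v => log_string ++ v ++ "\n"
        | none => log_string
      step.foldl (fun ls kv =>
        if ["thought", "action", "action_input", "observation", "output"].contains kv.1
        then ls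
        else ls ++ kv.1 ++ ": " ++ kv.2 ++ "\n") log_string) acc
    = acc ++ String.join (steps.flatMap pvCanon) := by
  induction steps generalizing acc with
  | nil => simp [String.join]
  | cons s t ih =>
    rw [List.foldl_cons, ih, List.flatMap_cons, join_append, ← String.append_assoc]
    exact congrArg (· ++ String.join (List.flatMap pvCanon t)) (step_eq s acc)

-- ===== VERDICT (by name: the statement is the Claim_ definition above) =====
theorem format_log_to_string_py_spec : Claim_equal_format_log_to_string_py := by
  intro steps _ hpre
  unfold Spec_format_log_to_string_py format_log_to_string_py_alt
  simp only [format_log_to_string_py]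
  rw [main_fold]
  rw [PySem.List.foldl_append_eq_flatMap]
  have hfm : steps.flatMap (fun step => (PySem.List.sorted step pvRank false).map pvLine)
      = steps.flatMap pvCanon := by
    apply List.flatMap_congr
    intro s hs
    exact stepmap_eq_canon s (hpre s hs)
  rw [hfm]
  simp [join_cons, join_append, String.append_assoc, String.join]
  have hf : List.foldl (fun r s => r ++ s) ("> Entering new CustomAgentExecutor chain...\n" ++ "") (List.flatMap pvCanon steps) = "> Entering new CustomAgentExecutor chain...\n" ++ List.foldl (fun r s => r ++ s) "" (List.flatMap pvCanon steps) := foldl_str _ _ _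
  rw [String.append_empty] at hf
  rw [hf, String.append_assoc]
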